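-- pv_equiv track=rewrite | github.com/tdixon97/bat-python-tools | utils.py | format_latex
-- ===== SOURCE A (Python) =====
-- def format_latex(list_str: list):
--     """
--     Format a string as latex with the radioisotopes formatted
--     Parameters
--         - list_str : a list of strings
--     Returns
--         - a list of formatted strings
--
--     Example:
--         >>> format_latex(["Pb214])
--         >>> [$^{214}$Pb]
--     """
--     list_new = []
--     for text in list_str:
--         modified_string = text.replace("Pb214", "$^{214}$Pb")
--         modified_string = modified_string.replace("2vbb", "$2\\nu\\beta\\beta$")
--         modified_string = modified_string.replace("Co60", "$^{60}$Co")
--         modified_string = modified_string.replace("Bi214", "$^{214}$Bi")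
--         modified_string = modified_string.replace("Tl208", "$^{208}$Tl")
--         modified_string = modified_string.replace("K40", "$^{40}$K")
--         modified_string = modified_string.replace("K42", "$^{42}$K")
--         modified_string = modified_string.replace("Bi212", "$^{212}$Bi")
--         modified_string = modified_string.replace("Ac228", "$^{228}$Ac")
--         modified_string = modified_string.replace("Ar39", "$^{39}$Ar")
--
--         list_new.append(modified_string)
--     return list_new
-- ===== SOURCE B (Python) =====
-- TABLE = [
--     ("Pb214", "$^{214}$Pb"),
--     ("2vbb", "$2\\nu\\beta\\beta$"),
--     ("Co60", "$^{60}$Co"),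
--     ("Bi214", "$^{214}$Bi"),
--     ("Tl208", "$^{208}$Tl"),
--     ("K40", "$^{40}$K"),
--     ("K42", "$^{42}$K"),
--     ("Bi212", "$^{212}$Bi"),
--     ("Ac228", "$^{228}$Ac"),
--     ("Ar39", "$^{39}$Ar"),
-- ]
--
--
-- def format_latex(list_str: list):
--     """Single left-to-right scan: at each position emit the LaTeX form of the
--     first table token that starts there, instead of ten sequential .replace passes."""
--     out = []
--     for text in list_str:
--         parts = []
--         i, n = 0, len(text)
--         while i < n:
--             for tok, rep in TABLE:
--                 if text.startswith(tok, i):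
--                     parts.append(rep)
--                     i += len(tok)
--                     break
--             else:
--                 parts.append(text[i])
--                 i += 1
--         out.append("".join(parts))
--     return out
-- ===== Notes on version B (the rewrite author's own statement) =====
-- stated objective: alternative
-- what changed: Replaces A's ten sequential full-string .replace passes by one single left-to-right scan that, at each position, emits the LaTeX form of the first matching token from a table (or copies the character), so each string is traversed once instead of ten times.
-- outside the precondition, e.g. on format_latex(['K4042']): A returns ['$^{40}$$^{42}$K'], B returns ['$^{40}$K42']; on format_latex(['Bi214212']): A returns ['$^{214}$$^{212}$Bi'], B returns ['$^{214}$Bi212']; on format_latex(['K42vbb']): A returns ['K4$2\\nu\\beta\\beta$'], B returns ['$^{42}$Kvbb']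
import Mathlib
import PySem

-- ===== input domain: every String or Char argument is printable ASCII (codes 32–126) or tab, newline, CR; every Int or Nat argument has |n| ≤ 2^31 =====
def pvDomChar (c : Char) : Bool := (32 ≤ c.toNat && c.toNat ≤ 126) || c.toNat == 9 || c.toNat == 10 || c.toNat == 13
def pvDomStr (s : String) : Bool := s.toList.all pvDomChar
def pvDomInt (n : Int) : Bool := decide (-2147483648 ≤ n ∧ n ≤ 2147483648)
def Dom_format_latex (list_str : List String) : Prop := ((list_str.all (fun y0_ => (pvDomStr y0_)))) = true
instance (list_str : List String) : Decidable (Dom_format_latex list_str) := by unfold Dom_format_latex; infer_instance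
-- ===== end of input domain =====

-- B replaces A's ten sequential full-string .replace passes by ONE left-to-right scan with a
-- token→LaTeX table (alternative algorithm, same cost class); equality is proved outside the
-- four adversarial token-overlap substrings excluded by Pre_.


-- ===== PORT A =====
def pvFmtA (text : String) : String :=
  let m1 := PySem.Str.replace text "Pb214" "$^{214}$Pb"
  let m2 := PySem.Str.replace m1 "2vbb" "$2\\nu\\beta\\beta$"
  let m3 := PySem.Str.replace m2 "Co60" "$^{60}$Co"
  let m4 := PySem.Str.replace m3 "Bi214" "$^{214}$Bi"
  let m5 := PySem.Str.replace m4 "Tl208" "$^{208}$Tl"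
  let m6 := PySem.Str.replace m5 "K40" "$^{40}$K"
  let m7 := PySem.Str.replace m6 "K42" "$^{42}$K"
  let m8 := PySem.Str.replace m7 "Bi212" "$^{212}$Bi"
  let m9 := PySem.Str.replace m8 "Ac228" "$^{228}$Ac"
  let m10 := PySem.Str.replace m9 "Ar39" "$^{39}$Ar"
  m10

def format_latex (list_str : List String) : List String :=
  list_str.foldl (fun list_new text => list_new ++ [pvFmtA text]) []

-- ===== PORT B =====
-- the token → LaTeX table of Source B, in Source B's order
def pvTable : List (List Char × List Char) :=
  [("Pb214".toList, "$^{214}$Pb".toList),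
   ("2vbb".toList, "$2\\nu\\beta\\beta$".toList),
   ("Co60".toList, "$^{60}$Co".toList),
   ("Bi214".toList, "$^{214}$Bi".toList),
   ("Tl208".toList, "$^{208}$Tl".toList),
   ("K40".toList, "$^{40}$K".toList),
   ("K42".toList, "$^{42}$K".toList),
   ("Bi212".toList, "$^{212}$Bi".toList),
   ("Ac228".toList, "$^{228}$Ac".toList),
   ("Ar39".toList, "$^{39}$Ar".toList)]

-- Source B's while-loop: scan left to right; at each position emit the replacement of the first
-- table token that starts there, else copy the character; fuel = remaining length bound
def pvScanF : Nat → List Char → List Char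
  | _, [] => []
  | 0, _ :: _ => []
  | f + 1, c :: t =>
    match pvTable.find? (fun p => p.1.isPrefixOf (c :: t)) with
    | some p => p.2 ++ pvScanF f ((c :: t).drop p.1.length)
    | none => c :: pvScanF f t

def pvScan (s : List Char) : List Char := pvScanF s.length s

def format_latex_alt (list_str : List String) : List String :=
  list_str.map (fun text => String.ofList (pvScan text.toList))

-- ===== PRECONDITION & SPEC =====
def pvBad : List (List Char) :=
  ["K4042".toList, "Bi214212".toList, "K42vbb".toList, "Bi212vbb".toList]

-- Pre_ excludes strings containing one of the four substrings on which two isotope tokens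
-- overlap or a replacement abuts a following token ("K4042", "Bi214212", "K42vbb",
-- "Bi212vbb"): there sequential-replace and single-pass-scan semantics legitimately give
-- different, equally defensible results (A may re-substitute into already formatted output).
def Pre_format_latex (list_str : List String) : Prop :=
  ∀ s ∈ list_str, ∀ b ∈ pvBad, ¬ b <:+: s.toList
instance (list_str : List String) : Decidable (Pre_format_latex list_str) := by
  unfold Pre_format_latex; infer_instance

def pvWitness_format_latex : List String := ["Pb214 and K40", "2vbb signal"]

def Spec_format_latex (list_str : List String) (out : List String) : Prop := out = format_latex_alt list_str
instance (list_str : List String) (out : List String) : Decidable (Spec_format_latex list_str out) := by unfold Spec_format_latex; infer_instance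

-- ===== CLAIM (what is proved, stated in full; the proofs are below) =====
def Claim_equal_format_latex : Prop := ∀ (list_str : List String), Dom_format_latex list_str → Pre_format_latex list_str → Spec_format_latex list_str (format_latex list_str)

-- ===== LEMMAS AND PROOFS =====

lemma go_zero (old new l acc : List Char) : PySem.Chars.replace.go old new 0 l acc = acc.reverse ++ l := by
  rw [PySem.Chars.replace.go]

lemma go_nilL (old new acc : List Char) (f : Nat) : PySem.Chars.replace.go old new f [] acc = acc.reverse := by
  cases f <;> rw [PySem.Chars.replace.go] <;> simp

lemma go_succ (old new : List Char) (fuel : Nat) (c : Char) (t acc : List Char) :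
    PySem.Chars.replace.go old new (fuel+1) (c::t) acc =
      if old.isPrefixOf (c::t) then PySem.Chars.replace.go old new fuel ((c::t).drop old.length) (new.reverse ++ acc)
      else PySem.Chars.replace.go old new fuel t (c :: acc) := by
  rw [PySem.Chars.replace.go]

lemma pvGo_acc (old new : List Char) (hold : old ≠ []) :
    ∀ fuel l acc, l.length ≤ fuel →
      PySem.Chars.replace.go old new fuel l acc =
        acc.reverse ++ PySem.Chars.replace.go old new l.length l [] := by
  intro fuel
  induction fuel using Nat.strong_induction_on with
  | _ fuel ih =>
    intro l acc h
    cases fuel with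
    | zero =>
      have : l = [] := by cases l <;> simp_all
      subst this; simp [go_zero, go_nilL]
    | succ f =>
      cases l with
      | nil => simp [go_nilL]
      | cons c t =>
        have hlen : old.length ≥ 1 := by cases old <;> simp_all
        have ht : t.length ≤ f := by simp at h; omega
        rw [go_succ]
        simp only [List.length_cons]
        rw [go_succ]
        by_cases hp : old.isPrefixOf (c::t)
        · simp only [hp, if_true]
          have hd2 : ((c::t).drop old.length).length ≤ t.length := by
            simp [List.length_drop]; omega
          rw [ih f (by omega) _ _ (le_trans hd2 ht),
              ih t.length (by omega) _ _ hd2]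
          simp
        · simp only [hp, if_false]
          rw [ih f (by omega) _ _ ht, ih t.length (by omega) t [c] (le_refl _)]
          simp

lemma pvReplace_eq_go (old new s : List Char) (hold : old ≠ []) :
    PySem.Chars.replace s old new = PySem.Chars.replace.go old new s.length s [] := by
  rw [PySem.Chars.replace]; simp [hold]

lemma pvReplace_nil (old new : List Char) (hold : old ≠ []) :
    PySem.Chars.replace [] old new = [] := by
  rw [pvReplace_eq_go _ _ _ hold]; simp [go_nilL]

lemma pvReplace_pos (old new s : List Char) (hold : old ≠ []) (h : old <+: s) :
    PySem.Chars.replace s old new =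
      new ++ PySem.Chars.replace (s.drop old.length) old new := by
  have hlen : old.length ≥ 1 := by cases old <;> simp_all
  cases s with
  | nil => exact absurd (List.prefix_nil.mp h) hold
  | cons c t =>
    rw [pvReplace_eq_go _ _ _ hold, pvReplace_eq_go _ _ _ hold]
    simp only [List.length_cons]
    rw [go_succ]
    have hp : old.isPrefixOf (c::t) = true := List.isPrefixOf_iff_prefix.mpr h
    simp only [hp, if_true]
    have hd : ((c::t).drop old.length).length ≤ t.length := by simp [List.length_drop]; omega
    rw [pvGo_acc old new hold _ _ _ hd]
    simp

lemma pvReplace_neg (old new : List Char) (c : Char) (t : List Char) (hold : old ≠ [])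
    (h : ¬ old <+: (c :: t)) :
    PySem.Chars.replace (c :: t) old new = c :: PySem.Chars.replace t old new := by
  rw [pvReplace_eq_go _ _ _ hold, pvReplace_eq_go _ _ _ hold]
  simp only [List.length_cons]
  rw [go_succ]
  have hp : old.isPrefixOf (c::t) = false := by
    rw [← Bool.not_eq_true]; exact fun hc => h (List.isPrefixOf_iff_prefix.mp hc)
  simp only [hp, Bool.false_eq_true, if_false]
  rw [pvGo_acc old new hold _ _ _ (le_refl _)]
  simp

lemma pvPrefix_replace (old new p : List Char) (hold : old ≠ [])
    (hnew : new.head? = some '$') (hp : '$' ∉ p) :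
    ∀ s, p <+: PySem.Chars.replace s old new → p <+: s := by
  have hgen : ∀ n s, s.length ≤ n → ∀ p, '$' ∉ p → p <+: PySem.Chars.replace s old new → p <+: s := by
    intro n
    induction n with
    | zero =>
      intro s hs p hp h
      have : s = [] := by cases s <;> simp_all
      subst this; rwa [pvReplace_nil _ _ hold] at h
    | succ n ih =>
      intro s hs p hp h
      cases s with
      | nil => rwa [pvReplace_nil _ _ hold] at h
      | cons c t =>
        by_cases hpre : old <+: (c :: t)
        · rw [pvReplace_pos _ _ _ hold hpre] at h
          cases p with
          | nil => exact List.nil_prefix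
          | cons a p' =>
            exfalso
            obtain ⟨n0, new', rfl⟩ : ∃ n0 new', new = n0 :: new' := by
              cases new <;> simp_all
            have ha : a = n0 := by
              rcases h with ⟨r, hr⟩; simp at hr; exact hr.1
            simp only [List.head?_cons, Option.some.injEq] at hnew
            apply hp; simp [ha, hnew]
        · rw [pvReplace_neg _ _ _ _ hold hpre] at h
          cases p with
          | nil => exact List.nil_prefix
          | cons a p' =>
            obtain ⟨rfl, h'⟩ : a = c ∧ p' <+: PySem.Chars.replace t old new := by
              rcases h with ⟨r, hr⟩
              simp at hr
              exact ⟨hr.1, ⟨r, hr.2⟩⟩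
            have ht : t.length ≤ n := by simp at hs; omega
            have := ih t ht p' (fun hc => hp (List.mem_cons_of_mem _ hc)) h'
            exact List.cons_prefix_cons.mpr ⟨rfl, this⟩
  intro s h
  exact hgen s.length s (le_refl _) p hp h

def pvChainL (P : List (List Char × List Char)) (s : List Char) : List Char :=
  P.foldl (fun s e => PySem.Chars.replace s e.1 e.2) s

def pvSane (P : List (List Char × List Char)) : Prop :=
  ∀ e ∈ P, e.1 ≠ [] ∧ '$' ∉ e.1 ∧ e.2.head? = some '$'

lemma pvCross {p a x : List Char} (h : p <+: a ++ x) :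
    p <+: a ∨ (a <+: p ∧ p.drop a.length <+: x) := by
  rcases List.prefix_or_prefix_of_prefix h (List.prefix_append a x) with h1 | h1
  · exact Or.inl h1
  · refine Or.inr ⟨h1, ?_⟩
    obtain ⟨q, rfl⟩ := h1
    simp at h ⊢
    exact h

lemma pvChainL_nil (P : List (List Char × List Char)) (hP : pvSane P) :
    pvChainL P [] = [] := by
  induction P with
  | nil => rfl
  | cons e P ih =>
    have he := hP e (List.mem_cons_self ..)
    simp only [pvChainL, List.foldl_cons]
    rw [pvReplace_nil _ _ he.1]
    exact ih (fun e' h' => hP e' (List.mem_cons_of_mem _ h'))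

lemma pvPrefix_chainL (P : List (List Char × List Char)) (hP : pvSane P)
    (p : List Char) (hp : '$' ∉ p) :
    ∀ s, p <+: pvChainL P s → p <+: s := by
  induction P with
  | nil => intro s h; exact h
  | cons e P ih =>
    intro s h
    have he := hP e (List.mem_cons_self ..)
    simp only [pvChainL, List.foldl_cons] at h
    have := ih (fun e' h' => hP e' (List.mem_cons_of_mem _ h')) _ h
    exact pvPrefix_replace e.1 e.2 p he.1 he.2.2 hp s this

lemma pvPush (old new : List Char) (hold : old ≠ []) :
    ∀ p x, (∀ m < p.length, ¬ old <+: (p.drop m ++ x)) →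
      PySem.Chars.replace (p ++ x) old new = p ++ PySem.Chars.replace x old new := by
  intro p
  induction p with
  | nil => intro x _; simp
  | cons c p' ih =>
    intro x H
    have h0 : ¬ old <+: (c :: (p' ++ x)) := by
      have := H 0 (by simp)
      simpa using this
    rw [List.cons_append, pvReplace_neg _ _ _ _ hold h0,
        ih x (fun m hm => by have := H (m+1) (by simp; omega); simpa using this)]
    simp

lemma pvChain_append (P : List (List Char × List Char)) (hP : pvSane P) :
    ∀ p x, (∀ e ∈ P, ∀ m < p.length, ¬ e.1 <+: (p.drop m ++ x)) →
      pvChainL P (p ++ x) = p ++ pvChainL P x := by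
  induction P with
  | nil => intro p x _; rfl
  | cons e P ih =>
    intro p x H
    have he := hP e (List.mem_cons_self ..)
    simp only [pvChainL, List.foldl_cons]
    rw [pvPush e.1 e.2 he.1 p x (H e (List.mem_cons_self ..))]
    refine ih (fun e' h' => hP e' (List.mem_cons_of_mem _ h')) p _ ?_
    intro e' h' m hm hcon
    rcases pvCross hcon with h1 | ⟨h1, h2⟩
    · exact H e' (List.mem_cons_of_mem _ h') m hm (h1.trans (List.prefix_append _ x))
    · have he' := hP e' (List.mem_cons_of_mem _ h')
      obtain ⟨q, hq⟩ := h1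
      have hqd : e'.1.drop (p.drop m).length = q := by rw [← hq]; simp
      have hnd : '$' ∉ q := fun hc => he'.2.1 (by rw [← hq]; exact List.mem_append_right _ hc)
      rw [hqd] at h2
      have hqx : q <+: x := pvPrefix_replace e.1 e.2 q he.1 he.2.2 hnd x h2
      apply H e' (List.mem_cons_of_mem _ h') m hm
      rw [← hq]
      exact (List.prefix_append_right_inj _).mpr hqx

lemma pvChain_cons (P : List (List Char × List Char)) (hP : pvSane P) :
    ∀ (c : Char) (t : List Char), (∀ e ∈ P, ¬ e.1 <+: (c :: t)) →
      pvChainL P (c :: t) = c :: pvChainL P t := by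
  induction P with
  | nil => intro c t _; rfl
  | cons e P ih =>
    intro c t H
    have he := hP e (List.mem_cons_self ..)
    simp only [pvChainL, List.foldl_cons]
    rw [pvReplace_neg _ _ _ _ he.1 (H e (List.mem_cons_self ..))]
    refine ih (fun e' h' => hP e' (List.mem_cons_of_mem _ h')) c _ ?_
    intro e' h' hcon
    have he' := hP e' (List.mem_cons_of_mem _ h')
    cases he'1 : e'.1 with
    | nil => exact he'.1 he'1
    | cons d o' =>
      rw [he'1] at hcon
      obtain ⟨rfl, h2⟩ := List.cons_prefix_cons.mp hcon
      have hnd : '$' ∉ o' := fun hc => he'.2.1 (by rw [he'1]; exact List.mem_cons_of_mem _ hc)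
      have := pvPrefix_replace e.1 e.2 o' he.1 he.2.2 hnd t h2
      exact H e' (List.mem_cons_of_mem _ h') (by rw [he'1]; exact List.cons_prefix_cons.mpr ⟨rfl, this⟩)

lemma pvNoHit {o p : List Char} (x : List Char)
    (h1 : ∀ m < p.length, ¬ o <+: p.drop m)
    (h2 : ∀ m < p.length, ¬ p.drop m <+: o) :
    ∀ m < p.length, ¬ o <+: (p.drop m ++ x) := by
  intro m hm hcon
  rcases pvCross hcon with h | ⟨h, _⟩
  · exact h1 m hm h
  · exact h2 m hm h

lemma pvTable_sane : pvSane pvTable := by unfold pvSane; decide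

lemma pvTok_len {p : List Char × List Char} (hp : p ∈ pvTable) : 1 ≤ p.1.length := by
  have : ∀ q ∈ pvTable, 1 ≤ q.1.length := by decide
  exact this p hp

lemma pvScanF_congr : ∀ f₁ f₂ s, s.length ≤ f₁ → s.length ≤ f₂ →
    pvScanF f₁ s = pvScanF f₂ s := by
  intro f₁
  induction f₁ using Nat.strong_induction_on with
  | _ f₁ ih =>
    intro f₂ s h1 h2
    cases s with
    | nil => cases f₁ <;> cases f₂ <;> rfl
    | cons c t =>
      cases f₁ with
      | zero => simp at h1
      | succ f =>
        cases f₂ with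
        | zero => simp at h2
        | succ g =>
          simp only [pvScanF]
          cases hf : pvTable.find? (fun p => p.1.isPrefixOf (c :: t)) with
          | none => rw [ih f (by omega) g t (by simpa using h1) (by simpa using h2)]
          | some p =>
            have hl := pvTok_len (List.mem_of_find?_eq_some hf)
            have hd : ((c :: t).drop p.1.length).length ≤ f := by
              simp [List.length_drop]; simp at h1; omega
            have hd2 : ((c :: t).drop p.1.length).length ≤ g := by
              simp [List.length_drop]; simp at h2; omega
            show p.2 ++ pvScanF f ((c :: t).drop p.1.length) = p.2 ++ pvScanF g ((c :: t).drop p.1.length)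
            rw [ih f (by omega) g _ hd hd2]

def pvGood (s : List Char) : Prop := ∀ b ∈ pvBad, ¬ b <:+: s

lemma pvGood_infix {s t : List Char} (h : pvGood s) (hi : t <:+: s) : pvGood t :=
  fun b hb hbt => h b hb (hbt.trans hi)

lemma pvBadHit {q rest : List Char} (b tok : List Char) (hb : b ∈ pvBad)
    (hbe : b = tok ++ q) (hq : q <+: rest) (hgood : pvGood (tok ++ rest)) : False := by
  apply hgood b hb
  rw [hbe]
  exact ((List.prefix_append_right_inj tok).mpr hq).isInfix

lemma pvStep (P₁ P₂ : List (List Char × List Char)) (tok rep rest : List Char)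
    (hsplit : pvTable = P₁ ++ (tok, rep) :: P₂)
    (H1 : ∀ e ∈ P₁, ∀ m < tok.length, ¬ e.1 <+: (tok.drop m ++ rest))
    (H2 : ∀ e ∈ P₂, ∀ m < rep.length,
        ¬ e.1 <+: (rep.drop m ++ PySem.Chars.replace (pvChainL P₁ rest) tok rep)) :
    pvChainL pvTable (tok ++ rest) = rep ++ pvChainL pvTable rest := by
  have hs := pvTable_sane
  rw [hsplit] at hs ⊢
  have hs1 : pvSane P₁ := fun e he => hs e (by simp [he])
  have hs2 : pvSane P₂ := fun e he => hs e (by simp [he])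
  have hse := hs (tok, rep) (by simp)
  have hdec : ∀ u, pvChainL (P₁ ++ (tok, rep) :: P₂) u =
      pvChainL P₂ (PySem.Chars.replace (pvChainL P₁ u) tok rep) := by
    intro u; simp [pvChainL, List.foldl_append]
  rw [hdec, hdec, pvChain_append P₁ hs1 tok rest H1,
      pvReplace_pos tok rep _ hse.1 (List.prefix_append _ _), List.drop_left]
  exact pvChain_append P₂ hs2 rep _ H2

lemma pvScan_match (tok rep rest : List Char)
    (hfind : pvTable.find? (fun p => p.1.isPrefixOf (tok ++ rest)) = some (tok, rep))
    (htok : tok ≠ []) :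
    pvScan (tok ++ rest) = rep ++ pvScan rest := by
  cases tok with
  | nil => exact absurd rfl htok
  | cons d tk =>
    show pvScanF ((d :: tk) ++ rest).length ((d :: tk) ++ rest) = _
    simp only [List.cons_append] at hfind ⊢
    have hL : (d :: (tk ++ rest)).length = (tk ++ rest).length + 1 := by simp
    rw [hL]
    simp only [pvScanF, hfind]
    have hdrop : (d :: (tk ++ rest)).drop (d :: tk).length = rest := by
      rw [← List.cons_append]; exact List.drop_left
    rw [hdrop]
    congr 1
    exact pvScanF_congr _ _ rest (by simp) (le_refl _)
lemma pvMain : ∀ n s, s.length ≤ n → pvGood s → pvChainL pvTable s = pvScan s := by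
  intro n
  induction n with
  | zero =>
    intro s hs hgood
    have : s = [] := by cases s <;> simp_all
    subst this
    rw [pvChainL_nil pvTable pvTable_sane]; rfl
  | succ n ih =>
    intro s hn hgood
    cases s with
    | nil => rw [pvChainL_nil pvTable pvTable_sane]; rfl
    | cons c t =>
      by_cases h1 : "Pb214".toList <+: (c :: t)
      · obtain ⟨rest, hrest⟩ := h1
        have hlen : rest.length ≤ n := by
          have := congrArg List.length hrest; simp at this hn; omega
        rw [← hrest] at hgood ⊢
        have hgood' : pvGood rest := pvGood_infix hgood ⟨"Pb214".toList, [], by simp⟩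
        have hfind : pvTable.find? (fun p => p.1.isPrefixOf ("Pb214".toList ++ rest)) = some ("Pb214".toList, "$^{214}$Pb".toList) := by
          simp only [pvTable]
          rw [List.find?_cons_of_pos (by simp [List.isPrefixOf_iff_prefix])]
        have hstep := pvStep [] [("2vbb".toList, "$2\\nu\\beta\\beta$".toList), ("Co60".toList, "$^{60}$Co".toList), ("Bi214".toList, "$^{214}$Bi".toList), ("Tl208".toList, "$^{208}$Tl".toList), ("K40".toList, "$^{40}$K".toList), ("K42".toList, "$^{42}$K".toList), ("Bi212".toList, "$^{212}$Bi".toList), ("Ac228".toList, "$^{228}$Ac".toList), ("Ar39".toList, "$^{39}$Ar".toList)] "Pb214".toList "$^{214}$Pb".toList rest (by rfl)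
          (by
            intro e he m hm hcon
            fin_cases he)
          (by
            intro e he m hm hcon
            fin_cases he <;> exact pvNoHit _ (by decide) (by decide) m hm hcon)
        rw [hstep, pvScan_match "Pb214".toList "$^{214}$Pb".toList rest hfind (by decide), ih rest hlen hgood']
      by_cases h2 : "2vbb".toList <+: (c :: t)
      · obtain ⟨rest, hrest⟩ := h2
        have hlen : rest.length ≤ n := by
          have := congrArg List.length hrest; simp at this hn; omega
        rw [← hrest] at hgood h1 ⊢
        have hgood' : pvGood rest := pvGood_infix hgood ⟨"2vbb".toList, [], by simp⟩
        have hfind : pvTable.find? (fun p => p.1.isPrefixOf ("2vbb".toList ++ rest)) = some ("2vbb".toList, "$2\\nu\\beta\\beta$".toList) := by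
          simp only [pvTable]
          rw [List.find?_cons_of_neg (by simpa [List.isPrefixOf_iff_prefix] using h1)]
          rw [List.find?_cons_of_pos (by simp [List.isPrefixOf_iff_prefix])]
        have hstep := pvStep [("Pb214".toList, "$^{214}$Pb".toList)] [("Co60".toList, "$^{60}$Co".toList), ("Bi214".toList, "$^{214}$Bi".toList), ("Tl208".toList, "$^{208}$Tl".toList), ("K40".toList, "$^{40}$K".toList), ("K42".toList, "$^{42}$K".toList), ("Bi212".toList, "$^{212}$Bi".toList), ("Ac228".toList, "$^{228}$Ac".toList), ("Ar39".toList, "$^{39}$Ar".toList)] "2vbb".toList "$2\\nu\\beta\\beta$".toList rest (by rfl)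
          (by
            intro e he m hm hcon
            fin_cases he <;> exact pvNoHit _ (by decide) (by decide) m hm hcon)
          (by
            intro e he m hm hcon
            fin_cases he <;> exact pvNoHit _ (by decide) (by decide) m hm hcon)
        rw [hstep, pvScan_match "2vbb".toList "$2\\nu\\beta\\beta$".toList rest hfind (by decide), ih rest hlen hgood']
      by_cases h3 : "Co60".toList <+: (c :: t)
      · obtain ⟨rest, hrest⟩ := h3
        have hlen : rest.length ≤ n := by
          have := congrArg List.length hrest; simp at this hn; omega
        rw [← hrest] at hgood h1 h2 ⊢
        have hgood' : pvGood rest := pvGood_infix hgood ⟨"Co60".toList, [], by simp⟩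
        have hfind : pvTable.find? (fun p => p.1.isPrefixOf ("Co60".toList ++ rest)) = some ("Co60".toList, "$^{60}$Co".toList) := by
          simp only [pvTable]
          rw [List.find?_cons_of_neg (by simpa [List.isPrefixOf_iff_prefix] using h1)]
          rw [List.find?_cons_of_neg (by simpa [List.isPrefixOf_iff_prefix] using h2)]
          rw [List.find?_cons_of_pos (by simp [List.isPrefixOf_iff_prefix])]
        have hstep := pvStep [("Pb214".toList, "$^{214}$Pb".toList), ("2vbb".toList, "$2\\nu\\beta\\beta$".toList)] [("Bi214".toList, "$^{214}$Bi".toList), ("Tl208".toList, "$^{208}$Tl".toList), ("K40".toList, "$^{40}$K".toList), ("K42".toList, "$^{42}$K".toList), ("Bi212".toList, "$^{212}$Bi".toList), ("Ac228".toList, "$^{228}$Ac".toList), ("Ar39".toList, "$^{39}$Ar".toList)] "Co60".toList "$^{60}$Co".toList rest (by rfl)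
          (by
            intro e he m hm hcon
            fin_cases he <;> exact pvNoHit _ (by decide) (by decide) m hm hcon)
          (by
            intro e he m hm hcon
            fin_cases he <;> exact pvNoHit _ (by decide) (by decide) m hm hcon)
        rw [hstep, pvScan_match "Co60".toList "$^{60}$Co".toList rest hfind (by decide), ih rest hlen hgood']
      by_cases h4 : "Bi214".toList <+: (c :: t)
      · obtain ⟨rest, hrest⟩ := h4
        have hlen : rest.length ≤ n := by
          have := congrArg List.length hrest; simp at this hn; omega
        rw [← hrest] at hgood h1 h2 h3 ⊢
        have hgood' : pvGood rest := pvGood_infix hgood ⟨"Bi214".toList, [], by simp⟩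
        have hfind : pvTable.find? (fun p => p.1.isPrefixOf ("Bi214".toList ++ rest)) = some ("Bi214".toList, "$^{214}$Bi".toList) := by
          simp only [pvTable]
          rw [List.find?_cons_of_neg (by simpa [List.isPrefixOf_iff_prefix] using h1)]
          rw [List.find?_cons_of_neg (by simpa [List.isPrefixOf_iff_prefix] using h2)]
          rw [List.find?_cons_of_neg (by simpa [List.isPrefixOf_iff_prefix] using h3)]
          rw [List.find?_cons_of_pos (by simp [List.isPrefixOf_iff_prefix])]
        have hstep := pvStep [("Pb214".toList, "$^{214}$Pb".toList), ("2vbb".toList, "$2\\nu\\beta\\beta$".toList), ("Co60".toList, "$^{60}$Co".toList)] [("Tl208".toList, "$^{208}$Tl".toList), ("K40".toList, "$^{40}$K".toList), ("K42".toList, "$^{42}$K".toList), ("Bi212".toList, "$^{212}$Bi".toList), ("Ac228".toList, "$^{228}$Ac".toList), ("Ar39".toList, "$^{39}$Ar".toList)] "Bi214".toList "$^{214}$Bi".toList rest (by rfl)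
          (by
            intro e he m hm hcon
            fin_cases he <;> exact pvNoHit _ (by decide) (by decide) m hm hcon)
          (by
            intro e he m hm hcon
            fin_cases he <;>
              first
              | exact pvNoHit _ (by decide) (by decide) m hm hcon
              | (rcases pvCross hcon with hA | ⟨hA, hB⟩
                 · exact (by decide : ∀ m < ("$^{214}$Bi".toList).length, ¬ ("Bi212".toList <+: ("$^{214}$Bi".toList).drop m)) m hm hA
                 · have hm' : m < 10 := lt_of_lt_of_le hm (le_of_eq (by decide))
                   clear hm; interval_cases m <;> try exact absurd hA (by decide)
                   have hq1 : "212".toList <+: PySem.Chars.replace (pvChainL [("Pb214".toList, "$^{214}$Pb".toList), ("2vbb".toList, "$2\\nu\\beta\\beta$".toList), ("Co60".toList, "$^{60}$Co".toList)] rest) "Bi214".toList "$^{214}$Bi".toList := by simpa using hB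
                   have hq2 := pvPrefix_replace "Bi214".toList "$^{214}$Bi".toList "212".toList (by decide) (by decide) (by decide) _ hq1
                   have hq3 := pvPrefix_chainL [("Pb214".toList, "$^{214}$Pb".toList), ("2vbb".toList, "$2\\nu\\beta\\beta$".toList), ("Co60".toList, "$^{60}$Co".toList)] (by unfold pvSane; decide) "212".toList (by decide) rest hq2
                   exact pvBadHit "Bi214212".toList "Bi214".toList (by decide) (by decide) hq3 hgood))
        rw [hstep, pvScan_match "Bi214".toList "$^{214}$Bi".toList rest hfind (by decide), ih rest hlen hgood']
      by_cases h5 : "Tl208".toList <+: (c :: t)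
      · obtain ⟨rest, hrest⟩ := h5
        have hlen : rest.length ≤ n := by
          have := congrArg List.length hrest; simp at this hn; omega
        rw [← hrest] at hgood h1 h2 h3 h4 ⊢
        have hgood' : pvGood rest := pvGood_infix hgood ⟨"Tl208".toList, [], by simp⟩
        have hfind : pvTable.find? (fun p => p.1.isPrefixOf ("Tl208".toList ++ rest)) = some ("Tl208".toList, "$^{208}$Tl".toList) := by
          simp only [pvTable]
          rw [List.find?_cons_of_neg (by simpa [List.isPrefixOf_iff_prefix] using h1)]
          rw [List.find?_cons_of_neg (by simpa [List.isPrefixOf_iff_prefix] using h2)]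
          rw [List.find?_cons_of_neg (by simpa [List.isPrefixOf_iff_prefix] using h3)]
          rw [List.find?_cons_of_neg (by simpa [List.isPrefixOf_iff_prefix] using h4)]
          rw [List.find?_cons_of_pos (by simp [List.isPrefixOf_iff_prefix])]
        have hstep := pvStep [("Pb214".toList, "$^{214}$Pb".toList), ("2vbb".toList, "$2\\nu\\beta\\beta$".toList), ("Co60".toList, "$^{60}$Co".toList), ("Bi214".toList, "$^{214}$Bi".toList)] [("K40".toList, "$^{40}$K".toList), ("K42".toList, "$^{42}$K".toList), ("Bi212".toList, "$^{212}$Bi".toList), ("Ac228".toList, "$^{228}$Ac".toList), ("Ar39".toList, "$^{39}$Ar".toList)] "Tl208".toList "$^{208}$Tl".toList rest (by rfl)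
          (by
            intro e he m hm hcon
            fin_cases he <;> exact pvNoHit _ (by decide) (by decide) m hm hcon)
          (by
            intro e he m hm hcon
            fin_cases he <;> exact pvNoHit _ (by decide) (by decide) m hm hcon)
        rw [hstep, pvScan_match "Tl208".toList "$^{208}$Tl".toList rest hfind (by decide), ih rest hlen hgood']
      by_cases h6 : "K40".toList <+: (c :: t)
      · obtain ⟨rest, hrest⟩ := h6
        have hlen : rest.length ≤ n := by
          have := congrArg List.length hrest; simp at this hn; omega
        rw [← hrest] at hgood h1 h2 h3 h4 h5 ⊢
        have hgood' : pvGood rest := pvGood_infix hgood ⟨"K40".toList, [], by simp⟩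
        have hfind : pvTable.find? (fun p => p.1.isPrefixOf ("K40".toList ++ rest)) = some ("K40".toList, "$^{40}$K".toList) := by
          simp only [pvTable]
          rw [List.find?_cons_of_neg (by simpa [List.isPrefixOf_iff_prefix] using h1)]
          rw [List.find?_cons_of_neg (by simpa [List.isPrefixOf_iff_prefix] using h2)]
          rw [List.find?_cons_of_neg (by simpa [List.isPrefixOf_iff_prefix] using h3)]
          rw [List.find?_cons_of_neg (by simpa [List.isPrefixOf_iff_prefix] using h4)]
          rw [List.find?_cons_of_neg (by simpa [List.isPrefixOf_iff_prefix] using h5)]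
          rw [List.find?_cons_of_pos (by simp [List.isPrefixOf_iff_prefix])]
        have hstep := pvStep [("Pb214".toList, "$^{214}$Pb".toList), ("2vbb".toList, "$2\\nu\\beta\\beta$".toList), ("Co60".toList, "$^{60}$Co".toList), ("Bi214".toList, "$^{214}$Bi".toList), ("Tl208".toList, "$^{208}$Tl".toList)] [("K42".toList, "$^{42}$K".toList), ("Bi212".toList, "$^{212}$Bi".toList), ("Ac228".toList, "$^{228}$Ac".toList), ("Ar39".toList, "$^{39}$Ar".toList)] "K40".toList "$^{40}$K".toList rest (by rfl)
          (by
            intro e he m hm hcon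
            fin_cases he <;> exact pvNoHit _ (by decide) (by decide) m hm hcon)
          (by
            intro e he m hm hcon
            fin_cases he <;>
              first
              | exact pvNoHit _ (by decide) (by decide) m hm hcon
              | (rcases pvCross hcon with hA | ⟨hA, hB⟩
                 · exact (by decide : ∀ m < ("$^{40}$K".toList).length, ¬ ("K42".toList <+: ("$^{40}$K".toList).drop m)) m hm hA
                 · have hm' : m < 8 := lt_of_lt_of_le hm (le_of_eq (by decide))
                   clear hm; interval_cases m <;> try exact absurd hA (by decide)
                   have hq1 : "42".toList <+: PySem.Chars.replace (pvChainL [("Pb214".toList, "$^{214}$Pb".toList), ("2vbb".toList, "$2\\nu\\beta\\beta$".toList), ("Co60".toList, "$^{60}$Co".toList), ("Bi214".toList, "$^{214}$Bi".toList), ("Tl208".toList, "$^{208}$Tl".toList)] rest) "K40".toList "$^{40}$K".toList := by simpa using hB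
                   have hq2 := pvPrefix_replace "K40".toList "$^{40}$K".toList "42".toList (by decide) (by decide) (by decide) _ hq1
                   have hq3 := pvPrefix_chainL [("Pb214".toList, "$^{214}$Pb".toList), ("2vbb".toList, "$2\\nu\\beta\\beta$".toList), ("Co60".toList, "$^{60}$Co".toList), ("Bi214".toList, "$^{214}$Bi".toList), ("Tl208".toList, "$^{208}$Tl".toList)] (by unfold pvSane; decide) "42".toList (by decide) rest hq2
                   exact pvBadHit "K4042".toList "K40".toList (by decide) (by decide) hq3 hgood))
        rw [hstep, pvScan_match "K40".toList "$^{40}$K".toList rest hfind (by decide), ih rest hlen hgood']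
      by_cases h7 : "K42".toList <+: (c :: t)
      · obtain ⟨rest, hrest⟩ := h7
        have hlen : rest.length ≤ n := by
          have := congrArg List.length hrest; simp at this hn; omega
        rw [← hrest] at hgood h1 h2 h3 h4 h5 h6 ⊢
        have hgood' : pvGood rest := pvGood_infix hgood ⟨"K42".toList, [], by simp⟩
        have hfind : pvTable.find? (fun p => p.1.isPrefixOf ("K42".toList ++ rest)) = some ("K42".toList, "$^{42}$K".toList) := by
          simp only [pvTable]
          rw [List.find?_cons_of_neg (by simpa [List.isPrefixOf_iff_prefix] using h1)]
          rw [List.find?_cons_of_neg (by simpa [List.isPrefixOf_iff_prefix] using h2)]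
          rw [List.find?_cons_of_neg (by simpa [List.isPrefixOf_iff_prefix] using h3)]
          rw [List.find?_cons_of_neg (by simpa [List.isPrefixOf_iff_prefix] using h4)]
          rw [List.find?_cons_of_neg (by simpa [List.isPrefixOf_iff_prefix] using h5)]
          rw [List.find?_cons_of_neg (by simpa [List.isPrefixOf_iff_prefix] using h6)]
          rw [List.find?_cons_of_pos (by simp [List.isPrefixOf_iff_prefix])]
        have hstep := pvStep [("Pb214".toList, "$^{214}$Pb".toList), ("2vbb".toList, "$2\\nu\\beta\\beta$".toList), ("Co60".toList, "$^{60}$Co".toList), ("Bi214".toList, "$^{214}$Bi".toList), ("Tl208".toList, "$^{208}$Tl".toList), ("K40".toList, "$^{40}$K".toList)] [("Bi212".toList, "$^{212}$Bi".toList), ("Ac228".toList, "$^{228}$Ac".toList), ("Ar39".toList, "$^{39}$Ar".toList)] "K42".toList "$^{42}$K".toList rest (by rfl)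
          (by
            intro e he m hm hcon
            fin_cases he <;>
              first
              | exact pvNoHit _ (by decide) (by decide) m hm hcon
              | (rcases pvCross hcon with hA | ⟨hA, hB⟩
                 · exact (by decide : ∀ m < ("K42".toList).length, ¬ ("2vbb".toList <+: ("K42".toList).drop m)) m hm hA
                 · have hm' : m < 3 := lt_of_lt_of_le hm (le_of_eq (by decide))
                   clear hm; interval_cases m <;> try exact absurd hA (by decide)
                   exact pvBadHit "K42vbb".toList "K42".toList (by decide) (by decide) (show "vbb".toList <+: rest by exact hB) hgood))
          (by
            intro e he m hm hcon
            fin_cases he <;> exact pvNoHit _ (by decide) (by decide) m hm hcon)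
        rw [hstep, pvScan_match "K42".toList "$^{42}$K".toList rest hfind (by decide), ih rest hlen hgood']
      by_cases h8 : "Bi212".toList <+: (c :: t)
      · obtain ⟨rest, hrest⟩ := h8
        have hlen : rest.length ≤ n := by
          have := congrArg List.length hrest; simp at this hn; omega
        rw [← hrest] at hgood h1 h2 h3 h4 h5 h6 h7 ⊢
        have hgood' : pvGood rest := pvGood_infix hgood ⟨"Bi212".toList, [], by simp⟩
        have hfind : pvTable.find? (fun p => p.1.isPrefixOf ("Bi212".toList ++ rest)) = some ("Bi212".toList, "$^{212}$Bi".toList) := by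
          simp only [pvTable]
          rw [List.find?_cons_of_neg (by simpa [List.isPrefixOf_iff_prefix] using h1)]
          rw [List.find?_cons_of_neg (by simpa [List.isPrefixOf_iff_prefix] using h2)]
          rw [List.find?_cons_of_neg (by simpa [List.isPrefixOf_iff_prefix] using h3)]
          rw [List.find?_cons_of_neg (by simpa [List.isPrefixOf_iff_prefix] using h4)]
          rw [List.find?_cons_of_neg (by simpa [List.isPrefixOf_iff_prefix] using h5)]
          rw [List.find?_cons_of_neg (by simpa [List.isPrefixOf_iff_prefix] using h6)]
          rw [List.find?_cons_of_neg (by simpa [List.isPrefixOf_iff_prefix] using h7)]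
          rw [List.find?_cons_of_pos (by simp [List.isPrefixOf_iff_prefix])]
        have hstep := pvStep [("Pb214".toList, "$^{214}$Pb".toList), ("2vbb".toList, "$2\\nu\\beta\\beta$".toList), ("Co60".toList, "$^{60}$Co".toList), ("Bi214".toList, "$^{214}$Bi".toList), ("Tl208".toList, "$^{208}$Tl".toList), ("K40".toList, "$^{40}$K".toList), ("K42".toList, "$^{42}$K".toList)] [("Ac228".toList, "$^{228}$Ac".toList), ("Ar39".toList, "$^{39}$Ar".toList)] "Bi212".toList "$^{212}$Bi".toList rest (by rfl)
          (by
            intro e he m hm hcon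
            fin_cases he <;>
              first
              | exact pvNoHit _ (by decide) (by decide) m hm hcon
              | (rcases pvCross hcon with hA | ⟨hA, hB⟩
                 · exact (by decide : ∀ m < ("Bi212".toList).length, ¬ ("2vbb".toList <+: ("Bi212".toList).drop m)) m hm hA
                 · have hm' : m < 5 := lt_of_lt_of_le hm (le_of_eq (by decide))
                   clear hm; interval_cases m <;> try exact absurd hA (by decide)
                   exact pvBadHit "Bi212vbb".toList "Bi212".toList (by decide) (by decide) (show "vbb".toList <+: rest by exact hB) hgood))
          (by
            intro e he m hm hcon
            fin_cases he <;> exact pvNoHit _ (by decide) (by decide) m hm hcon)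
        rw [hstep, pvScan_match "Bi212".toList "$^{212}$Bi".toList rest hfind (by decide), ih rest hlen hgood']
      by_cases h9 : "Ac228".toList <+: (c :: t)
      · obtain ⟨rest, hrest⟩ := h9
        have hlen : rest.length ≤ n := by
          have := congrArg List.length hrest; simp at this hn; omega
        rw [← hrest] at hgood h1 h2 h3 h4 h5 h6 h7 h8 ⊢
        have hgood' : pvGood rest := pvGood_infix hgood ⟨"Ac228".toList, [], by simp⟩
        have hfind : pvTable.find? (fun p => p.1.isPrefixOf ("Ac228".toList ++ rest)) = some ("Ac228".toList, "$^{228}$Ac".toList) := by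
          simp only [pvTable]
          rw [List.find?_cons_of_neg (by simpa [List.isPrefixOf_iff_prefix] using h1)]
          rw [List.find?_cons_of_neg (by simpa [List.isPrefixOf_iff_prefix] using h2)]
          rw [List.find?_cons_of_neg (by simpa [List.isPrefixOf_iff_prefix] using h3)]
          rw [List.find?_cons_of_neg (by simpa [List.isPrefixOf_iff_prefix] using h4)]
          rw [List.find?_cons_of_neg (by simpa [List.isPrefixOf_iff_prefix] using h5)]
          rw [List.find?_cons_of_neg (by simpa [List.isPrefixOf_iff_prefix] using h6)]
          rw [List.find?_cons_of_neg (by simpa [List.isPrefixOf_iff_prefix] using h7)]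
          rw [List.find?_cons_of_neg (by simpa [List.isPrefixOf_iff_prefix] using h8)]
          rw [List.find?_cons_of_pos (by simp [List.isPrefixOf_iff_prefix])]
        have hstep := pvStep [("Pb214".toList, "$^{214}$Pb".toList), ("2vbb".toList, "$2\\nu\\beta\\beta$".toList), ("Co60".toList, "$^{60}$Co".toList), ("Bi214".toList, "$^{214}$Bi".toList), ("Tl208".toList, "$^{208}$Tl".toList), ("K40".toList, "$^{40}$K".toList), ("K42".toList, "$^{42}$K".toList), ("Bi212".toList, "$^{212}$Bi".toList)] [("Ar39".toList, "$^{39}$Ar".toList)] "Ac228".toList "$^{228}$Ac".toList rest (by rfl)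
          (by
            intro e he m hm hcon
            fin_cases he <;> exact pvNoHit _ (by decide) (by decide) m hm hcon)
          (by
            intro e he m hm hcon
            fin_cases he <;> exact pvNoHit _ (by decide) (by decide) m hm hcon)
        rw [hstep, pvScan_match "Ac228".toList "$^{228}$Ac".toList rest hfind (by decide), ih rest hlen hgood']
      by_cases h10 : "Ar39".toList <+: (c :: t)
      · obtain ⟨rest, hrest⟩ := h10
        have hlen : rest.length ≤ n := by
          have := congrArg List.length hrest; simp at this hn; omega
        rw [← hrest] at hgood h1 h2 h3 h4 h5 h6 h7 h8 h9 ⊢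
        have hgood' : pvGood rest := pvGood_infix hgood ⟨"Ar39".toList, [], by simp⟩
        have hfind : pvTable.find? (fun p => p.1.isPrefixOf ("Ar39".toList ++ rest)) = some ("Ar39".toList, "$^{39}$Ar".toList) := by
          simp only [pvTable]
          rw [List.find?_cons_of_neg (by simpa [List.isPrefixOf_iff_prefix] using h1)]
          rw [List.find?_cons_of_neg (by simpa [List.isPrefixOf_iff_prefix] using h2)]
          rw [List.find?_cons_of_neg (by simpa [List.isPrefixOf_iff_prefix] using h3)]
          rw [List.find?_cons_of_neg (by simpa [List.isPrefixOf_iff_prefix] using h4)]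
          rw [List.find?_cons_of_neg (by simpa [List.isPrefixOf_iff_prefix] using h5)]
          rw [List.find?_cons_of_neg (by simpa [List.isPrefixOf_iff_prefix] using h6)]
          rw [List.find?_cons_of_neg (by simpa [List.isPrefixOf_iff_prefix] using h7)]
          rw [List.find?_cons_of_neg (by simpa [List.isPrefixOf_iff_prefix] using h8)]
          rw [List.find?_cons_of_neg (by simpa [List.isPrefixOf_iff_prefix] using h9)]
          rw [List.find?_cons_of_pos (by simp [List.isPrefixOf_iff_prefix])]
        have hstep := pvStep [("Pb214".toList, "$^{214}$Pb".toList), ("2vbb".toList, "$2\\nu\\beta\\beta$".toList), ("Co60".toList, "$^{60}$Co".toList), ("Bi214".toList, "$^{214}$Bi".toList), ("Tl208".toList, "$^{208}$Tl".toList), ("K40".toList, "$^{40}$K".toList), ("K42".toList, "$^{42}$K".toList), ("Bi212".toList, "$^{212}$Bi".toList), ("Ac228".toList, "$^{228}$Ac".toList)] [] "Ar39".toList "$^{39}$Ar".toList rest (by rfl)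
          (by
            intro e he m hm hcon
            fin_cases he <;> exact pvNoHit _ (by decide) (by decide) m hm hcon)
          (by
            intro e he m hm hcon
            fin_cases he)
        rw [hstep, pvScan_match "Ar39".toList "$^{39}$Ar".toList rest hfind (by decide), ih rest hlen hgood']
      -- no token matches at the front
      have hnone : ∀ e ∈ pvTable, ¬ e.1 <+: (c :: t) := by
        intro e he
        fin_cases he
        · exact h1
        · exact h2
        · exact h3
        · exact h4
        · exact h5
        · exact h6
        · exact h7
        · exact h8
        · exact h9
        · exact h10
      have hf : pvTable.find? (fun p => p.1.isPrefixOf (c :: t)) = none := by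
        rw [List.find?_eq_none]
        intro p hp
        simpa [List.isPrefixOf_iff_prefix] using hnone p hp
      have hgt : pvGood t := pvGood_infix hgood ⟨[c], [], by simp⟩
      have hscan : pvScan (c :: t) = c :: pvScan t := by
        show pvScanF (t.length + 1) (c :: t) = _
        simp only [pvScanF, hf]
        rfl
      rw [pvChain_cons pvTable pvTable_sane c t hnone, hscan,
          ih t (by simp at hn; omega) hgt]

lemma pvFmtA_eq (text : String) (h : pvGood text.toList) :
    pvFmtA text = String.ofList (pvScan text.toList) := by
  have hchain : (pvFmtA text).toList = pvChainL pvTable text.toList := by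
    simp only [pvFmtA, PySem.Str.toList_replace, pvChainL, pvTable,
      List.foldl_cons, List.foldl_nil]
  have h2 : (pvFmtA text).toList = pvScan text.toList :=
    hchain.trans (pvMain text.toList.length _ le_rfl h)
  calc pvFmtA text = String.ofList (pvFmtA text).toList := by simp
    _ = String.ofList (pvScan text.toList) := by rw [h2]

-- ===== VERDICT (by name: the statement is the Claim_ definition above) =====
theorem format_latex_spec : Claim_equal_format_latex := by
  intro list_str _ hpre
  unfold Spec_format_latex format_latex format_latex_alt
  rw [PySem.List.foldl_append_singleton_eq_map]
  exact List.map_congr_left fun s hs => pvFmtA_eq s (fun b hb => hpre s hs b hb)
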